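-- pv_equiv track=rewrite | github.com/eduardolucana9/parcial-tecnicas-programacion | ejercicio1.py | obtenerPalabrasRotadas
-- ===== SOURCE A (Python) =====
-- def soloTieneEspaciosEnBlanco(palabra):
--
--     for letra in palabra:
--         if letra != " ":
--             return False
--
--     return True
--
-- def rotarPalabra(palabra):
--
--     #PABLO => P-ABLO => ABLO-P => ABLOP
--
--     longitudDeLaPalabra = len(palabra)
--     palabraRotada = palabra[1:longitudDeLaPalabra] + palabra[0]
--
--     return palabraRotada
--
-- def obtenerPalabrasRotadas(palabra):
--
--     if len(palabra) == 0:
--         return []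
--
--     if soloTieneEspaciosEnBlanco(palabra):
--         return []
--
--     palabrasFinales = [palabra]
--
--     for valor in range(len(palabra)):
--
--         if valor > 0:
--
--             indiceDeLaUltimaPalabraRotada = len(palabrasFinales) - 1
--
--             ultimaPalabraRotada = palabrasFinales[indiceDeLaUltimaPalabraRotada]
--
--             palabraRotada = rotarPalabra(ultimaPalabraRotada)
--
--             palabrasFinales.append(palabraRotada)
--
--     return palabrasFinales
-- ===== SOURCE B (Python) =====
-- def obtenerPalabrasRotadas(palabra):
--     # Empty strings and all-space strings yield no rotations (all() is True on '').
--     if all(c == ' ' for c in palabra):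
--         return []
--     # Each rotation is computed directly from the original word at offset i.
--     return [palabra[i:] + palabra[:i] for i in range(len(palabra))]
-- ===== Notes on version B (the rewrite author's own statement) =====
-- stated objective: simpler
-- what changed: B drops the accumulator chain that repeatedly rotates the last produced word by one character and instead computes each rotation independently from the original word as palabra[i:] + palabra[:i], with the two guards collapsed into a single all() check.
import Mathlib
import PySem

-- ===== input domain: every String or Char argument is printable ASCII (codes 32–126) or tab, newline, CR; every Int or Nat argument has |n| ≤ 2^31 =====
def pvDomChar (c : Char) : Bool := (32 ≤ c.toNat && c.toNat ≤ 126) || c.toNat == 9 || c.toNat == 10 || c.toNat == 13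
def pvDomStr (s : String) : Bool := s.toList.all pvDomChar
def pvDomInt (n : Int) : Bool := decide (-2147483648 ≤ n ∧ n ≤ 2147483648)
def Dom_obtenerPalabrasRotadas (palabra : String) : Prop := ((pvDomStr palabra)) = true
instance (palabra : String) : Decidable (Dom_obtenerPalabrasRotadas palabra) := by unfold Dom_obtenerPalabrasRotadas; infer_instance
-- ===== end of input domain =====

-- B computes each rotation directly from the original word (palabra[i:] + palabra[:i]) instead of
-- repeatedly rotating the previously produced word by one character; objective: simpler.


-- ===== PORT A =====
-- for letra in palabra: if letra != " ": return False; return True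
def soloTieneEspaciosEnBlanco : List Char → Bool
  | [] => true
  | letra :: rest => if letra ≠ ' ' then false else soloTieneEspaciosEnBlanco rest

-- palabra[1:len(palabra)] + palabra[0]; palabra[0] would raise IndexError on the empty string, but A
-- only calls this helper on non-empty words — the [] in that unreachable 'none' branch marks the raise.
def rotarPalabra (palabra : List Char) : List Char :=
  let longitudDeLaPalabra : Int := palabra.length
  PySem.List.slice palabra (some 1) (some longitudDeLaPalabra) ++
    (match PySem.List.pyGet? palabra 0 with | some c => [c] | none => [])

def obtenerPalabrasRotadas (palabra : String) : List String :=
  let l := palabra.toList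
  if l.length = 0 then []
  else if soloTieneEspaciosEnBlanco l then []
  else
    ((PySem.List.pyRange 0 (l.length : Int) 1).foldl
      (fun palabrasFinales valor =>
        if valor > 0 then
          palabrasFinales ++
            [rotarPalabra (PySem.List.pyGetD palabrasFinales ((palabrasFinales.length : Int) - 1) [])]
        else palabrasFinales)
      [l]).map String.ofList

-- ===== PORT B =====
def obtenerPalabrasRotadas_alt (palabra : String) : List String :=
  let l := palabra.toList
  if l.all (fun c => c == ' ') then []
  else (List.range l.length).map (fun (i : Nat) =>
    String.ofList (PySem.List.slice l (some (i : Int)) none ++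
                   PySem.List.slice l none (some (i : Int))))

-- ===== PRECONDITION & SPEC =====
def Spec_obtenerPalabrasRotadas (palabra : String) (out : List String) : Prop := out = obtenerPalabrasRotadas_alt palabra
instance (palabra : String) (out : List String) : Decidable (Spec_obtenerPalabrasRotadas palabra out) := by unfold Spec_obtenerPalabrasRotadas; infer_instance

-- ===== CLAIM (what is proved, stated in full; the proofs are below) =====
def Claim_equal_obtenerPalabrasRotadas : Prop := ∀ (palabra : String), Dom_obtenerPalabrasRotadas palabra → Spec_obtenerPalabrasRotadas palabra (obtenerPalabrasRotadas palabra)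

-- ===== LEMMAS AND PROOFS =====

-- A's guard is B's guard
theorem solo_eq_all (l : List Char) : soloTieneEspaciosEnBlanco l = l.all (fun c => c == ' ') := by
  induction l with
  | nil => rfl
  | cons c r ih =>
    simp only [soloTieneEspaciosEnBlanco, List.all_cons, ih]
    by_cases h : c = ' ' <;> simp [h]

-- rotating one step on a cons cell
theorem rot_cons (c : Char) (r : List Char) : rotarPalabra (c :: r) = r ++ [c] := by
  have h1 : ((1:Int)) = ((1:Nat):Int) := rfl
  simp only [rotarPalabra, h1, PySem.List.slice_natCast]
  simp [PySem.List.pyGet?, PySem.List.pyIdx?]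

-- A's pyGetD at index (length - 1) picks the appended last element
theorem pyGetD_concat (zs : List (List Char)) (y d : List Char) :
    PySem.List.pyGetD (zs ++ [y]) (((zs ++ [y]).length : Int) - 1) d = y := by
  have h : (((zs ++ [y]).length : Int) - 1) = ((zs.length : Nat) : Int) := by simp
  rw [h, PySem.List.pyGetD_natCast]
  simp [List.getD]

-- invariant of A's loop: after m appending iterations starting from … ++ [x], the tail of the
-- accumulator holds the m successive one-step rotations of x
theorem loop_inv (m : Nat) (a : Int) (ha : 1 ≤ a) (acc0 : List (List Char)) (x : List Char) :
    (PySem.List.pyRange a (a + m) 1).foldl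
      (fun palabrasFinales valor =>
        if valor > 0 then
          palabrasFinales ++
            [rotarPalabra (PySem.List.pyGetD palabrasFinales ((palabrasFinales.length : Int) - 1) [])]
        else palabrasFinales)
      (acc0 ++ [x])
    = acc0 ++ (List.range (m + 1)).map (fun j => rotarPalabra^[j] x) := by
  induction m with
  | zero =>
    rw [show a + (0:Nat) = a by simp, PySem.List.pyRange_one_eq_nil le_rfl]
    simp
  | succ m ih =>
    rw [show a + ((m+1 : Nat) : Int) = (a + m) + 1 by push_cast; ring,
        PySem.List.pyRange_one_succ_right (by omega), List.foldl_append, ih]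
    have hpos : (a + (m:Int)) > 0 := by omega
    simp only [List.foldl_cons, List.foldl_nil, if_pos hpos]
    have hsplit : acc0 ++ (List.range (m + 1)).map (fun j => rotarPalabra^[j] x)
        = (acc0 ++ (List.range m).map (fun j => rotarPalabra^[j] x)) ++ [rotarPalabra^[m] x] := by
      rw [List.range_succ]; simp
    rw [hsplit, pyGetD_concat,
      show rotarPalabra (rotarPalabra^[m] x) = rotarPalabra^[m+1] x from
        (Function.iterate_succ_apply' rotarPalabra m x).symm]
    simp only [List.range_succ, List.map_append, List.map_cons, List.map_nil, List.append_assoc,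
      List.cons_append, List.nil_append]

-- j one-step rotations = the direct slice formula at offset j
theorem rot_iter (l : List Char) (j : Nat) (hj : j < l.length) :
    rotarPalabra^[j] l = l.drop j ++ l.take j := by
  induction j with
  | zero => simp
  | succ j ih =>
    have hj' : j < l.length := by omega
    rw [Function.iterate_succ_apply', ih hj',
        List.drop_eq_getElem_cons hj', List.cons_append, rot_cons, List.take_add_one]
    simp [hj']

theorem main_eq (palabra : String) :
    obtenerPalabrasRotadas palabra = obtenerPalabrasRotadas_alt palabra := by
  unfold obtenerPalabrasRotadas obtenerPalabrasRotadas_alt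
  set l := palabra.toList with hl
  by_cases hall : l.all (fun c => c == ' ')
  · by_cases hlen : l.length = 0 <;> simp [hall, hlen, solo_eq_all]
  · have hne : l ≠ [] := fun h => by simp [h] at hall
    have hlen : l.length ≠ 0 := by simpa using hne
    have hn : 0 < l.length := Nat.pos_of_ne_zero hlen
    simp only [if_neg hlen, solo_eq_all, if_neg hall]
    rw [PySem.List.pyRange_one_cons (by exact_mod_cast hn), List.foldl_cons,
        if_neg (by omega : ¬((0:Int) > 0))]
    have hend : (1:Int) + ((l.length - 1 : Nat) : Int) = (l.length : Int) := by
      push_cast [Nat.cast_sub hn]; ring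
    rw [show PySem.List.pyRange (0+1) (l.length : Int) 1
          = PySem.List.pyRange 1 (1 + ((l.length - 1 : Nat) : Int)) 1 by norm_num [hend]]
    rw [show ([l] : List (List Char)) = [] ++ [l] by simp,
        loop_inv (l.length - 1) 1 le_rfl [] l,
        show l.length - 1 + 1 = l.length by omega]
    simp only [List.nil_append, List.map_map]
    refine List.map_congr_left ?_
    intro i hi
    rw [List.mem_range] at hi
    simp only [Function.comp_apply, rot_iter l i hi,
      PySem.List.slice_from_natCast, PySem.List.slice_to_natCast]

-- ===== VERDICT (by name: the statement is the Claim_ definition above) =====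
theorem obtenerPalabrasRotadas_spec : Claim_equal_obtenerPalabrasRotadas := by
  intro palabra _
  exact main_eq palabra
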